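-- pv_equiv track=rewrite | github.com/MichelleViscaino/Machine-Learning | Driver_failsv5.py | Driver_failsv5
-- ===== SOURCE A (Python) =====
-- def Driver_failsv5(speed_change,true_det):
--     aux=range(len(true_det))
--     fail='none'
--     alert_pedestrian='off'
--     aux_true_det='none' #initial value
--     #first search for a pedestrian in the scene and
--     #to give priority in case of a lot of signals detected
--     for i in aux:
--         if true_det[i]=='peaton':
--             alert_pedestrian='on'
--         #to give more priority to semaforo and pare than cruce,cebra and ceda
--         if aux_true_det=='pare' or aux_true_det=='rojo':
--             aux_true_det='pare'
--         elif aux_true_det=='amarillo' or aux_true_det=='verde':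
--             aux_true_det='verde'
--         else:
--             aux_true_det=true_det[i]
--     #Inference Rules
--     if aux_true_det=='pare' or aux_true_det=='rojo':
--         if speed_change=='detiene':
--             fail='t_verde'
--         else:
--             fail='t_roja'
--     elif aux_true_det=='cebra' or aux_true_det=='cruce' or aux_true_det=='ceda':
--         if alert_pedestrian=='on':
--             if speed_change=='detiene':
--                 fail='t_verde'
--             else:
--                 fail='t_roja'
--         else:
--              if speed_change!='aumenta':
--                  fail='t_verde'
--              else:
--                  fail='t_roja'
--     elif aux_true_det=='verde' or aux_true_det=='amarillo':
--         fail='t_verde'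
--
--     return fail
-- ===== SOURCE B (Python) =====
-- def Driver_failsv5(speed_change, true_det):
--     # pedestrian alert: any element equal to 'peaton'
--     alert = any(x == 'peaton' for x in true_det)
--     # signal state: first element of the signal family locks; else last element; else 'none'
--     state = 'none'
--     for x in true_det:
--         if x in ('pare', 'rojo', 'amarillo', 'verde'):
--             state = x
--             break
--     else:
--         if true_det:
--             state = true_det[-1]
--     if state in ('pare', 'rojo'):
--         return 't_verde' if speed_change == 'detiene' else 't_roja'
--     if state in ('cebra', 'cruce', 'ceda'):
--         if alert:
--             return 't_verde' if speed_change == 'detiene' else 't_roja'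
--         return 't_verde' if speed_change != 'aumenta' else 't_roja'
--     if state in ('verde', 'amarillo'):
--         return 't_verde'
--     return 'none'
-- ===== Notes on version B (the rewrite author's own statement) =====
-- stated objective: simpler
-- what changed: Replaces A's sticky-lock accumulator loop (which re-normalises the accumulated signal on every iteration) by an any() pedestrian test plus an early-exit first-signal-occurrence search with a last-element fallback, then applies the same inference rules.
import Mathlib
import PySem

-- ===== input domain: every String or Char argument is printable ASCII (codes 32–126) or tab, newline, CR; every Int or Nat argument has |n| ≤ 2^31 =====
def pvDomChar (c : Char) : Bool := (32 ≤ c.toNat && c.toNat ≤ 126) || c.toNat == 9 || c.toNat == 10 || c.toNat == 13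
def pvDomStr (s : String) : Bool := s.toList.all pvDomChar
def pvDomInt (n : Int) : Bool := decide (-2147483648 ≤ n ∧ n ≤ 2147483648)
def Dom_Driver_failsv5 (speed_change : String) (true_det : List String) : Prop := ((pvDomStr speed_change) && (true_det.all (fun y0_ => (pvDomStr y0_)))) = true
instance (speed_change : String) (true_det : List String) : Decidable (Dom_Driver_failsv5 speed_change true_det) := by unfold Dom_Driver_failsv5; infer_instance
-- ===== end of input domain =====

-- B replaces A's sticky-lock accumulator loop by an any() pedestrian test plus an early-exit
-- first-signal search with a last-element fallback (objective: simpler; same inference rules).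

-- ===== PORT A =====
-- A's loop body: update the pedestrian alert, then the sticky signal accumulator.
def pvStepA (acc : String × String) (x : String) : String × String :=
  let alert := if x = "peaton" then "on" else acc.1
  let aux :=
    if acc.2 = "pare" ∨ acc.2 = "rojo" then "pare"
    else if acc.2 = "amarillo" ∨ acc.2 = "verde" then "verde"
    else x
  (alert, aux)

def Driver_failsv5 (speed_change : String) (true_det : List String) : String :=
  -- for i in range(len(true_det)): ... true_det[i] ...
  let st := (PySem.List.pyRange 0 (PySem.List.len true_det) 1).foldl
      (fun acc i => pvStepA acc (PySem.List.pyGetD true_det i "")) ("off", "none")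
  let alert_pedestrian := st.1
  let aux_true_det := st.2
  if aux_true_det = "pare" ∨ aux_true_det = "rojo" then
    (if speed_change = "detiene" then "t_verde" else "t_roja")
  else if aux_true_det = "cebra" ∨ aux_true_det = "cruce" ∨ aux_true_det = "ceda" then
    (if alert_pedestrian = "on" then
      (if speed_change = "detiene" then "t_verde" else "t_roja")
     else (if speed_change ≠ "aumenta" then "t_verde" else "t_roja"))
  else if aux_true_det = "verde" ∨ aux_true_det = "amarillo" then "t_verde"
  else "none"

-- ===== PORT B =====
-- B's for…break loop: first element belonging to the signal family, if any.
def pvFirstSignal : List String → Option String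
  | [] => none
  | x :: xs =>
      if x = "pare" ∨ x = "rojo" ∨ x = "amarillo" ∨ x = "verde" then some x
      else pvFirstSignal xs

def Driver_failsv5_alt (speed_change : String) (true_det : List String) : String :=
  let alert := true_det.any (fun x => x == "peaton")
  let state :=
    match pvFirstSignal true_det with
    | some x => x
    | none => (PySem.List.pyGet? true_det (-1)).getD "none"   -- true_det[-1] if nonempty, else keep 'none'
  if state = "pare" ∨ state = "rojo" then
    (if speed_change = "detiene" then "t_verde" else "t_roja")
  else if state = "cebra" ∨ state = "cruce" ∨ state = "ceda" then
    (if alert then (if speed_change = "detiene" then "t_verde" else "t_roja")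
     else (if speed_change ≠ "aumenta" then "t_verde" else "t_roja"))
  else if state = "verde" ∨ state = "amarillo" then "t_verde"
  else "none"

-- ===== PRECONDITION & SPEC =====
def Spec_Driver_failsv5 (speed_change : String) (true_det : List String) (out : String) : Prop := out = Driver_failsv5_alt speed_change true_det
instance (speed_change : String) (true_det : List String) (out : String) : Decidable (Spec_Driver_failsv5 speed_change true_det out) := by unfold Spec_Driver_failsv5; infer_instance

-- ===== CLAIM (what is proved, stated in full; the proofs are below) =====
def Claim_equal_Driver_failsv5 : Prop := ∀ (speed_change : String) (true_det : List String), Dom_Driver_failsv5 speed_change true_det → Spec_Driver_failsv5 speed_change true_det (Driver_failsv5 speed_change true_det)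

-- ===== LEMMAS AND PROOFS =====

-- the outcome only depends on the CLASS of the resolved signal string
def pvCls (s : String) : Nat :=
  if s = "pare" ∨ s = "rojo" then 1
  else if s = "cebra" ∨ s = "cruce" ∨ s = "ceda" then 2
  else if s = "verde" ∨ s = "amarillo" then 3
  else 0

def pvRes (speed : String) (alert : Bool) (c : Nat) : String :=
  if c = 1 then (if speed = "detiene" then "t_verde" else "t_roja")
  else if c = 2 then
    (if alert then (if speed = "detiene" then "t_verde" else "t_roja")
     else (if speed ≠ "aumenta" then "t_verde" else "t_roja"))
  else if c = 3 then "t_verde"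
  else "none"

-- A's alert component
lemma pvAlertA (xs : List String) (al au : String) :
    (xs.foldl pvStepA (al, au)).1 = (if xs.any (fun x => x == "peaton") then "on" else al) := by
  induction xs generalizing al au with
  | nil => simp
  | cons x xs ih =>
      simp only [List.foldl_cons, List.any_cons, pvStepA]
      by_cases hx : x = "peaton" <;> simp [hx, ih]

-- once locked in the pare/rojo family, A's accumulator stays there
lemma pvLock1 (xs : List String) (al au : String) (h : au = "pare" ∨ au = "rojo") :
    (xs.foldl pvStepA (al, au)).2 = "pare" ∨ (xs.foldl pvStepA (al, au)).2 = au := by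
  induction xs generalizing al au with
  | nil => simp
  | cons x xs ih =>
      simp only [List.foldl_cons, pvStepA, if_pos h]
      exact Or.inl ((ih (if x = "peaton" then "on" else al) "pare" (Or.inl rfl)).elim id id)

-- once locked in the amarillo/verde family, A's accumulator stays there
lemma pvLock2 (xs : List String) (al au : String) (h : au = "amarillo" ∨ au = "verde")
    (h' : ¬ (au = "pare" ∨ au = "rojo")) :
    (xs.foldl pvStepA (al, au)).2 = "verde" ∨ (xs.foldl pvStepA (al, au)).2 = au := by
  induction xs generalizing al au with
  | nil => simp
  | cons x xs ih =>
      simp only [List.foldl_cons, pvStepA, if_neg h', if_pos h]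
      rcases ih (if x = "peaton" then "on" else al) "verde" (Or.inr rfl) (by simp) with h2 | h2 <;>
        exact Or.inl h2

lemma pvClsLocked (xs : List String) (al au : String)
    (h : au = "pare" ∨ au = "rojo" ∨ au = "amarillo" ∨ au = "verde") :
    pvCls (xs.foldl pvStepA (al, au)).2 = pvCls au := by
  by_cases h1 : au = "pare" ∨ au = "rojo"
  · rcases pvLock1 xs al au h1 with h2 | h2 <;> simp [pvCls, h2, h1]
  · have h3 : au = "amarillo" ∨ au = "verde" := by tauto
    rcases pvLock2 xs al au h3 h1 with h2 | h2
    · rw [h2]; rcases h3 with h4 | h4 <;> simp [pvCls, h4]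
    · rw [h2]

-- main: starting from a non-signal accumulator, A's resolved class is B's resolved class
lemma pvMain (xs : List String) (al au : String)
    (h : ¬ (au = "pare" ∨ au = "rojo" ∨ au = "amarillo" ∨ au = "verde")) :
    pvCls (xs.foldl pvStepA (al, au)).2 =
      pvCls (match pvFirstSignal xs with
             | some x => x
             | none => xs.getLast?.getD au) := by
  induction xs generalizing al au with
  | nil => simp [pvFirstSignal]
  | cons x xs ih =>
      have hstep : (x :: xs).foldl pvStepA (al, au)
          = xs.foldl pvStepA (if x = "peaton" then "on" else al, x) := by
        simp only [List.foldl_cons, pvStepA]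
        have h1 : ¬ (au = "pare" ∨ au = "rojo") := by tauto
        have h2 : ¬ (au = "amarillo" ∨ au = "verde") := by tauto
        rw [if_neg h1, if_neg h2]
      by_cases hx : x = "pare" ∨ x = "rojo" ∨ x = "amarillo" ∨ x = "verde"
      · rw [hstep, pvClsLocked xs _ x hx]
        simp [pvFirstSignal, if_pos hx]
      · rw [hstep, ih _ x hx]
        simp only [pvFirstSignal, if_neg hx]
        cases hfs : pvFirstSignal xs with
        | some y => simp
        | none =>
            cases xs with
            | nil => simp
            | cons z zs =>
                cases hgl : (z :: zs).getLast? with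
                | none => simp [List.getLast?_eq_none_iff] at hgl
                | some l => simp [hgl]

-- the two final if-chains compute pvRes of the class
lemma pvTailA (speed al aux : String) :
    (if aux = "pare" ∨ aux = "rojo" then
        (if speed = "detiene" then "t_verde" else "t_roja")
      else if aux = "cebra" ∨ aux = "cruce" ∨ aux = "ceda" then
        (if al = "on" then (if speed = "detiene" then "t_verde" else "t_roja")
         else (if speed ≠ "aumenta" then "t_verde" else "t_roja"))
      else if aux = "verde" ∨ aux = "amarillo" then "t_verde"
      else "none") = pvRes speed (al = "on") (pvCls aux) := by
  unfold pvCls pvRes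
  split_ifs <;> simp_all

lemma pvTailB (speed : String) (al : Bool) (st : String) :
    (if st = "pare" ∨ st = "rojo" then
        (if speed = "detiene" then "t_verde" else "t_roja")
      else if st = "cebra" ∨ st = "cruce" ∨ st = "ceda" then
        (if al then (if speed = "detiene" then "t_verde" else "t_roja")
         else (if speed ≠ "aumenta" then "t_verde" else "t_roja"))
      else if st = "verde" ∨ st = "amarillo" then "t_verde"
      else "none") = pvRes speed al (pvCls st) := by
  unfold pvCls pvRes
  split_ifs <;> simp_all

-- B's fallback true_det[-1] is getLast?.getD "none"
lemma pvLastGet (xs : List String) :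
    (PySem.List.pyGet? xs (-1)).getD "none" = xs.getLast?.getD "none" := by
  simp [PySem.List.pyGet?, PySem.List.pyIdx?]
  cases xs with
  | nil => simp
  | cons z zs =>
      rw [List.getLast?_eq_getElem?]
      simp

-- ===== VERDICT (by name: the statement is the Claim_ definition above) =====
theorem Driver_failsv5_spec : Claim_equal_Driver_failsv5 := by
  intro speed td _
  show Driver_failsv5 speed td = Driver_failsv5_alt speed td
  unfold Driver_failsv5 Driver_failsv5_alt
  rw [PySem.List.foldl_pyRange_zero_pyGetD td "" pvStepA ("off", "none")]
  rw [pvTailA, pvTailB, pvAlertA, pvMain td "off" "none" (by simp)]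
  congr 1
  · by_cases h : (td.any fun x => x == "peaton") = true <;> simp [h]
  · congr 1
    cases pvFirstSignal td <;> simp [pvLastGet]
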